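-- pv_equiv track=rewrite | github.com/gotsta1/three_in_row | backend/src/domain/game/move_finder.py | has_possible_move
-- ===== SOURCE A (Python) =====
-- def has_possible_move(board: list[list[str]]) -> bool:
--     """Возвращает True, если рядом есть свап, дающий совпадение."""
--     rows = len(board)
--     cols = len(board[0]) if rows else 0
--     for r in range(rows):
--         for c in range(cols):
--             if c + 1 < cols and _would_match(board, r, c, r, c + 1):
--                 return True
--             if r + 1 < rows and _would_match(board, r, c, r + 1, c):
--                 return True
--     return False
--
-- def _would_match(
--     board: list[list[str]],
--     r1: int,
--     c1: int,
--     r2: int,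
--     c2: int,
-- ) -> bool:
--     board[r1][c1], board[r2][c2] = board[r2][c2], board[r1][c1]
--     try:
--         return _cell_in_match(board, r1, c1) or _cell_in_match(board, r2, c2)
--     finally:
--         board[r1][c1], board[r2][c2] = board[r2][c2], board[r1][c1]
--
-- def _cell_in_match(board: list[list[str]], r: int, c: int) -> bool:
--     val = board[r][c]
--     if val is None:
--         return False
--     rows = len(board)
--     cols = len(board[0]) if rows else 0
--
--     left = c
--     while left - 1 >= 0 and board[r][left - 1] == val:
--         left -= 1
--     right = c
--     while right + 1 < cols and board[r][right + 1] == val: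
--         right += 1
--     if right - left + 1 >= 3:
--         return True
--
--     up = r
--     while up - 1 >= 0 and board[up - 1][c] == val:
--         up -= 1
--     down = r
--     while down + 1 < rows and board[down + 1][c] == val:
--         down += 1
--     return down - up + 1 >= 3
-- ===== SOURCE B (Python) =====
-- def has_possible_move(board: list[list[str]]) -> bool:
--     """True iff some adjacent swap creates a match-3 (pure: no board mutation).
--     Alternative strategy: instead of mutating the board and scanning whole runs,
--     check only the <=3 triples within distance 2 of each swapped cell on a
--     virtually-swapped board."""
--     rows = len(board)
--     cols = len(board[0]) if rows else 0
--
--     def cell(sw, r, c):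
--         (r1, c1), (r2, c2) = sw
--         if r == r1 and c == c1:
--             r, c = r2, c2
--         elif r == r2 and c == c2:
--             r, c = r1, c1
--         return board[r][c]
--
--     def in_match(sw, r, c):
--         v = cell(sw, r, c)
--         for d in (0, 1, 2):
--             if d <= c and c - d + 2 < cols and all(cell(sw, r, c - d + i) == v for i in (0, 1, 2)):
--                 return True
--         for d in (0, 1, 2):
--             if d <= r and r - d + 2 < rows and all(cell(sw, r - d + i, c) == v for i in (0, 1, 2)):
--                 return True
--         return False
--
--     for r in range(rows):
--         for c in range(cols):
--             if c + 1 < cols: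
--                 sw = ((r, c), (r, c + 1))
--                 if in_match(sw, r, c) or in_match(sw, r, c + 1):
--                     return True
--             if r + 1 < rows:
--                 sw = ((r, c), (r + 1, c))
--                 if in_match(sw, r, c) or in_match(sw, r + 1, c):
--                     return True
--     return False
-- ===== Notes on version B (the rewrite author's own statement) =====
-- stated objective: alternative
-- what changed: B replaces A's mutate-swap-restore plus run-length while-loop scans with a pure virtually-swapped cell lookup and a bounded check of at most 3 horizontal and 3 vertical triples around each swapped cell (worst-case O(1) per cell instead of O(R+C), though not measurably faster on random boards where A's runs are short).
-- outside the precondition, e.g. on has_possible_move([['x', 'x', 'x'], ['x']]): A returns True, B returns True; on has_possible_move([['a', 'b'], ['c']]): A raises IndexError, B raises IndexError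
import Mathlib
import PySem

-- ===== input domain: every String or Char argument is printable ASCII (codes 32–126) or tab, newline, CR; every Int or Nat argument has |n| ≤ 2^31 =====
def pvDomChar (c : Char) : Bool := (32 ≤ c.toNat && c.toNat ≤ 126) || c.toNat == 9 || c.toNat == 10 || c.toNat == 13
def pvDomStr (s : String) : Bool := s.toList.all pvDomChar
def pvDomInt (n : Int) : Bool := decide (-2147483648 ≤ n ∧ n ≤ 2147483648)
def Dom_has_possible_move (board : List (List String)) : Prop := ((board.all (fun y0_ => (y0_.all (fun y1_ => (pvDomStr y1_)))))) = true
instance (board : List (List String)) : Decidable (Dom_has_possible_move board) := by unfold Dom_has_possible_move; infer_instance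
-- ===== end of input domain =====

-- B replaces A's mutate-swap-restore + unbounded run scans by a pure virtually-swapped
-- lookup and a bounded check of at most 3 triples per direction around each swapped cell.
-- A restores the board before returning, so A has no net mutation; equivalence is about the return value.

-- ===== PORT A =====
-- board[r][c]; all accesses A performs are guarded in-range under Pre_, so the default is never used
def cellA (b : List (List String)) (r c : Nat) : String := (b.getD r []).getD c ""

-- the `while left - 1 >= 0 and g (left-1) == val: left -= 1` loop of _cell_in_match
def scanL (g : Nat → String) (v : String) : Nat → Nat
  | 0 => 0
  | l + 1 => if g l = v then scanL g v l else l + 1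

-- the `while right + 1 < n and g (right+1) == val: right += 1` loop of _cell_in_match
def scanR (g : Nat → String) (v : String) (n : Nat) (r : Nat) : Nat :=
  if h : r + 1 < n ∧ g (r + 1) = v then scanR g v n (r + 1) else r
termination_by n - r
decreasing_by omega

-- _cell_in_match; the `val is None` branch is dropped: cells are Strings, never None
def cellInMatchA (b : List (List String)) (r c : Nat) : Bool :=
  let v := cellA b r c
  let rows := b.length
  let cols := (b.getD 0 []).length
  let leftv := scanL (fun j => cellA b r j) v c
  let rightv := scanR (fun j => cellA b r j) v cols c
  if 3 ≤ rightv - leftv + 1 then true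
  else
    let upv := scanL (fun i => cellA b i c) v r
    let downv := scanR (fun i => cellA b i c) v rows r
    decide (3 ≤ downv - upv + 1)

def setCell (b : List (List String)) (r c : Nat) (v : String) : List (List String) :=
  b.set r ((b.getD r []).set c v)

-- the tuple swap of _would_match (and its restore: net effect on the return value is a swapped copy)
def swapCells (b : List (List String)) (r1 c1 r2 c2 : Nat) : List (List String) :=
  let v1 := cellA b r1 c1
  let v2 := cellA b r2 c2
  setCell (setCell b r1 c1 v2) r2 c2 v1

def wouldMatchA (b : List (List String)) (r1 c1 r2 c2 : Nat) : Bool :=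
  let b2 := swapCells b r1 c1 r2 c2
  cellInMatchA b2 r1 c1 || cellInMatchA b2 r2 c2

def has_possible_move (board : List (List String)) : Bool :=
  let rows := board.length
  let cols := (board.getD 0 []).length
  (List.range rows).any fun r => (List.range cols).any fun c =>
    (decide (c + 1 < cols) && wouldMatchA board r c r (c + 1)) ||
    (decide (r + 1 < rows) && wouldMatchA board r c (r + 1) c)

-- ===== PORT B =====
-- cell of the virtually swapped board (B's `cell`)
def cellSw (b : List (List String)) (r1 c1 r2 c2 r c : Nat) : String :=
  if r = r1 ∧ c = c1 then cellA b r2 c2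
  else if r = r2 ∧ c = c2 then cellA b r1 c1
  else cellA b r c

-- one candidate triple starting d cells before position c along a line g of length n
def tripleAt (g : Nat → String) (n : Nat) (v : String) (c d : Nat) : Bool :=
  decide (d ≤ c) && decide (c - d + 2 < n) &&
    (g (c - d) == v) && (g (c - d + 1) == v) && (g (c - d + 2) == v)

-- B's `in_match`: bounded window, at most 3 triples per direction
def inMatchSw (b : List (List String)) (rows cols : Nat) (r1 c1 r2 c2 r c : Nat) : Bool :=
  let v := cellSw b r1 c1 r2 c2 r c
  ([0, 1, 2].any fun d => tripleAt (fun j => cellSw b r1 c1 r2 c2 r j) cols v c d) ||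
  ([0, 1, 2].any fun d => tripleAt (fun i => cellSw b r1 c1 r2 c2 i c) rows v r d)

def has_possible_move_alt (board : List (List String)) : Bool :=
  let rows := board.length
  let cols := (board.getD 0 []).length
  (List.range rows).any fun r => (List.range cols).any fun c =>
    (decide (c + 1 < cols) &&
      (inMatchSw board rows cols r c r (c + 1) r c ||
       inMatchSw board rows cols r c r (c + 1) r (c + 1))) ||
    (decide (r + 1 < rows) &&
      (inMatchSw board rows cols r c (r + 1) c r c ||
       inMatchSw board rows cols r c (r + 1) c (r + 1) c))

-- ===== PRECONDITION & SPEC =====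
-- Pre_ excludes ragged boards with a row shorter than row 0: there A indexes past a short row
-- and raises IndexError on almost all of them; on the few where an early match returns first,
-- B agrees anyway (see cites), so nothing A-returning-and-B-different is hidden.
def Pre_has_possible_move (board : List (List String)) : Prop :=
  ∀ row ∈ board, (board.getD 0 []).length ≤ row.length
instance (board : List (List String)) : Decidable (Pre_has_possible_move board) := by
  unfold Pre_has_possible_move; infer_instance

def pvWitness_has_possible_move : List (List String) := [["a", "b"], ["c", "d"]]

def Spec_has_possible_move (board : List (List String)) (out : Bool) : Prop := out = has_possible_move_alt board
instance (board : List (List String)) (out : Bool) : Decidable (Spec_has_possible_move board out) := by unfold Spec_has_possible_move; infer_instance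

-- ===== CLAIM (what is proved, stated in full; the proofs are below) =====
def Claim_equal_has_possible_move : Prop := ∀ (board : List (List String)), Dom_has_possible_move board → Pre_has_possible_move board → Spec_has_possible_move board (has_possible_move board)

-- ===== LEMMAS AND PROOFS =====

theorem scanL_le (g : Nat → String) (v : String) : ∀ c, scanL g v c ≤ c := by
  intro c; induction c with
  | zero => simp [scanL]
  | succ l ih => simp only [scanL]; split <;> omega

theorem scanL_run (g : Nat → String) (v : String) :
    ∀ c j, scanL g v c ≤ j → j < c → g j = v := by
  intro c; induction c with
  | zero => intro j h1 h2; omega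
  | succ l ih =>
    intro j h1 h2
    simp only [scanL] at h1
    split at h1
    · rcases Nat.lt_or_ge j l with h | h
      · exact ih j h1 h
      · have : j = l := by omega
        subst this; assumption
    · omega

theorem scanL_stop (g : Nat → String) (v : String) :
    ∀ c, scanL g v c = 0 ∨ g (scanL g v c - 1) ≠ v := by
  intro c; induction c with
  | zero => left; simp [scanL]
  | succ l ih =>
    simp only [scanL]; split
    · exact ih
    · right; simpa using ‹¬ g l = v›

theorem scanL_min (g : Nat → String) (v : String) (c m : Nat)
    (hm : ∀ j, m ≤ j → j < c → g j = v) : scanL g v c ≤ m := by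
  by_contra h
  rw [Nat.not_le] at h
  rcases scanL_stop g v c with h0 | hne
  · omega
  · exact hne (hm _ (by omega) (by have := scanL_le g v c; omega))

theorem scanR_ge (g : Nat → String) (v : String) (n : Nat) : ∀ r, r ≤ scanR g v n r := by
  intro r
  rw [scanR]
  split
  · have := scanR_ge g v n (r + 1); omega
  · omega
termination_by r => n - r
decreasing_by omega

theorem scanR_lt (g : Nat → String) (v : String) (n : Nat) :
    ∀ r, r < n → scanR g v n r < n := by
  intro r hr
  rw [scanR]
  split
  · exact scanR_lt g v n (r + 1) (by omega)
  · exact hr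
termination_by r => n - r
decreasing_by omega

theorem scanR_run (g : Nat → String) (v : String) (n : Nat) :
    ∀ r j, r < j → j ≤ scanR g v n r → g j = v := by
  intro r j h1 h2
  rw [scanR] at h2
  split at h2
  · rcases Nat.lt_or_ge (r + 1) j with h | h
    · exact scanR_run g v n (r + 1) j h h2
    · have : j = r + 1 := by omega
      subst this; exact ‹(r + 1 < n ∧ g (r + 1) = v)›.2
  · omega
termination_by r => n - r
decreasing_by omega

theorem scanR_stop (g : Nat → String) (v : String) (n : Nat) :
    ∀ r, n ≤ scanR g v n r + 1 ∨ g (scanR g v n r + 1) ≠ v := by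
  intro r
  rw [scanR]
  split
  · exact scanR_stop g v n (r + 1)
  · rcases Nat.lt_or_ge (r + 1) n with h | h
    · right; intro hv; exact ‹¬ (r + 1 < n ∧ g (r + 1) = v)› ⟨h, hv⟩
    · left; omega
termination_by r => n - r
decreasing_by omega

theorem scanR_max (g : Nat → String) (v : String) (n r m : Nat) (hm : m < n)
    (h : ∀ j, r < j → j ≤ m → g j = v) : m ≤ scanR g v n r := by
  by_contra hc
  rw [Nat.not_le] at hc
  rcases scanR_stop g v n r with h0 | hne
  · omega
  · exact hne (h _ (by have := scanR_ge g v n r; omega) (by omega))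

-- the core window lemma: the full-run test equals the bounded 3-triple test
theorem run_iff_window (g : Nat → String) (v : String) (n c : Nat)
    (hc : c < n) (hv : g c = v) :
    (decide (3 ≤ scanR g v n c - scanL g v c + 1)) =
      ([0, 1, 2].any fun d => tripleAt g n v c d) := by
  have hle := scanL_le g v c
  have hge := scanR_ge g v n c
  have hlt := scanR_lt g v n c hc
  set l := scanL g v c with hl
  set rt := scanR g v n c with hr
  have hrunall : ∀ j, l ≤ j → j ≤ rt → g j = v := by
    intro j hj1 hj2
    rcases Nat.lt_or_ge j c with h | h
    · exact scanL_run g v c j hj1 h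
    · rcases Nat.eq_or_lt_of_le h with h' | h'
      · rw [← h']; exact hv
      · exact scanR_run g v n c j h' hj2
  by_cases hb : ([0, 1, 2].any fun d => tripleAt g n v c d) = true
  · rw [hb]
    simp only [decide_eq_true_eq]
    rw [List.any_eq_true] at hb
    obtain ⟨d, hd, ht⟩ := hb
    simp only [tripleAt, Bool.and_eq_true, decide_eq_true_eq, beq_iff_eq] at ht
    obtain ⟨⟨⟨⟨hdc, hbnd⟩, e0⟩, e1⟩, e2⟩ := ht
    have hdle : d ≤ 2 := by
      simp only [List.mem_cons, List.not_mem_nil, or_false] at hd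
      rcases hd with h | h | h <;> omega
    have hall : ∀ j, c - d ≤ j → j ≤ c - d + 2 → g j = v := by
      intro j hj1 hj2
      rcases Nat.eq_or_lt_of_le hj1 with h' | h'
      · rw [← h']; exact e0
      · rcases Nat.eq_or_lt_of_le hj2 with h'' | h'' 
        · rw [h'']; exact e2
        · have : j = c - d + 1 := by omega
          rw [this]; exact e1
    have hminl : l ≤ c - d :=
      scanL_min g v c (c - d) (fun j hj1 hj2 => hall j hj1 (by omega))
    have hmaxr : c - d + 2 ≤ rt :=
      scanR_max g v n c (c - d + 2) hbnd (fun j hj1 hj2 => hall j (by omega) hj2)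
    omega
  · rw [eq_false_of_ne_true hb]
    apply decide_eq_false
    intro hP
    apply hb
    rw [List.any_eq_true]
    have htrip : ∀ d, d ≤ c → c - d + 2 < n → (∀ i, i ≤ 2 → g (c - d + i) = v) →
        tripleAt g n v c d = true := by
      intro d hd1 hd2 hd3
      simp only [tripleAt, Bool.and_eq_true, decide_eq_true_eq, beq_iff_eq]
      exact ⟨⟨⟨⟨hd1, hd2⟩, hd3 0 (by omega)⟩, hd3 1 (by omega)⟩, hd3 2 (by omega)⟩
    rcases Nat.lt_or_ge c (l + 1) with ha | ha
    · refine ⟨0, by simp, htrip 0 (by omega) (by omega) ?_⟩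
      intro i hi; exact hrunall (c - 0 + i) (by omega) (by omega)
    · rcases Nat.lt_or_ge c (l + 2) with ha' | ha'
      · refine ⟨1, by simp, htrip 1 (by omega) (by omega) ?_⟩
        intro i hi; exact hrunall (c - 1 + i) (by omega) (by omega)
      · refine ⟨2, by simp, htrip 2 (by omega) (by omega) ?_⟩
        intro i hi; exact hrunall (c - 2 + i) (by omega) (by omega)
-- cell access through setCell
theorem cellA_setCell (b : List (List String)) (r' c' : Nat) (v : String) (r c : Nat) :
    cellA (setCell b r' c' v) r c =
      if r = r' ∧ c = c' ∧ r' < b.length ∧ c' < (b.getD r' []).length then v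
      else cellA b r c := by
  unfold cellA setCell
  simp only [List.getD_eq_getElem?_getD, List.getElem?_set]
  by_cases h1 : r' = r
  · rw [if_pos h1]
    by_cases h2 : r' < b.length
    · rw [if_pos h2]
      simp only [Option.getD_some, List.getElem?_set]
      by_cases h3 : c' = c
      · by_cases h4 : c' < (b[r']?.getD []).length
        · rw [if_pos h3, if_pos h4, if_pos ⟨h1.symm, h3.symm, h2, h4⟩]
          simp
        · rw [if_pos h3, if_neg h4, if_neg (fun h => h4 h.2.2.2)]
          rw [← h1, ← h3]
          simp [List.getElem?_eq_none (Nat.le_of_not_lt h4)]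
      · rw [if_neg h3, if_neg (fun h => h3 (h.2.1.symm))]
        rw [h1]
    · rw [if_neg h2, if_neg (fun h => h2 h.2.2.1)]
      rw [h1] at h2
      simp [List.getElem?_eq_none (Nat.le_of_not_lt h2)]
  · rw [if_neg h1, if_neg (fun h => h1 h.1.symm)]

theorem setCell_length (b : List (List String)) (r c : Nat) (v : String) :
    (setCell b r c v).length = b.length := by
  simp [setCell]

theorem setCell_row_length (b : List (List String)) (r c : Nat) (v : String) (r' : Nat) :
    ((setCell b r c v).getD r' []).length = (b.getD r' []).length := by
  simp only [setCell, List.getD_eq_getElem?_getD, List.getElem?_set]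
  by_cases h : r = r'
  · subst h
    by_cases hl : r < b.length
    · simp [hl]
    · simp [hl]
  · simp [h]

theorem swapCells_length (b : List (List String)) (r1 c1 r2 c2 : Nat) :
    (swapCells b r1 c1 r2 c2).length = b.length := by
  simp only [swapCells]
  rw [setCell_length, setCell_length]

theorem swapCells_row0_length (b : List (List String)) (r1 c1 r2 c2 : Nat) :
    ((swapCells b r1 c1 r2 c2).getD 0 []).length = ((b.getD 0 []).length) := by
  simp only [swapCells]
  rw [setCell_row_length, setCell_row_length]

-- the swapped board's cells are exactly cellSw, given in-range distinct swap positions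
theorem cellA_swapCells (b : List (List String)) (r1 c1 r2 c2 : Nat)
    (hP : Pre_has_possible_move b)
    (h1 : r1 < b.length) (hc1 : c1 < (b.getD 0 []).length)
    (h2 : r2 < b.length) (hc2 : c2 < (b.getD 0 []).length)
    (hne : ¬ (r1 = r2 ∧ c1 = c2)) (r c : Nat) :
    cellA (swapCells b r1 c1 r2 c2) r c = cellSw b r1 c1 r2 c2 r c := by
  have hrow : ∀ r', r' < b.length → (b.getD 0 []).length ≤ (b.getD r' []).length := by
    intro r' hr'
    have hmem : b.getD r' [] ∈ b := by
      have he : b.getD r' [] = b[r'] := by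
        simp [List.getD_eq_getElem?_getD, List.getElem?_eq_getElem hr']
      rw [he]; exact List.getElem_mem hr'
    exact hP _ hmem
  have hc1' : c1 < (b.getD r1 []).length := lt_of_lt_of_le hc1 (hrow r1 h1)
  have hc2' : c2 < (b.getD r2 []).length := lt_of_lt_of_le hc2 (hrow r2 h2)
  simp only [swapCells, cellSw]
  rw [cellA_setCell, setCell_length, setCell_row_length]
  by_cases ha : r = r2 ∧ c = c2
  · obtain ⟨ha1, ha2⟩ := ha
    rw [if_pos ⟨ha1, ha2, h2, hc2'⟩]
    have hno : ¬ (r = r1 ∧ c = c1) := by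
      intro h
      exact hne ⟨by omega, by omega⟩
    rw [if_neg hno, if_pos ⟨ha1, ha2⟩]
  · rw [if_neg (fun h => ha ⟨h.1, h.2.1⟩), cellA_setCell]
    by_cases hb' : r = r1 ∧ c = c1
    · rw [if_pos ⟨hb'.1, hb'.2, h1, hc1'⟩, if_pos hb']
    · rw [if_neg (fun h => hb' ⟨h.1, h.2.1⟩), if_neg hb', if_neg ha]

theorem if_decide_or (P Q : Prop) [Decidable P] [Decidable Q] (x y : Bool)
    (hx : decide P = x) (hy : decide Q = y) :
    (if P then true else decide Q) = (x || y) := by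
  by_cases h : P
  · simp [h] at hx
    simp [h, ← hx]
  · simp [h] at hx
    simp [h, ← hx, hy]

-- per-cell equality of A's match test on the swapped board with B's bounded test
theorem cellInMatch_eq (b : List (List String)) (r1 c1 r2 c2 : Nat)
    (hP : Pre_has_possible_move b)
    (h1 : r1 < b.length) (hc1 : c1 < (b.getD 0 []).length)
    (h2 : r2 < b.length) (hc2 : c2 < (b.getD 0 []).length)
    (hne : ¬ (r1 = r2 ∧ c1 = c2)) (r c : Nat)
    (hr : r < b.length) (hc : c < (b.getD 0 []).length) :
    cellInMatchA (swapCells b r1 c1 r2 c2) r c =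
      inMatchSw b b.length ((b.getD 0 []).length) r1 c1 r2 c2 r c := by
  have hcell := cellA_swapCells b r1 c1 r2 c2 hP h1 hc1 h2 hc2 hne
  simp only [cellInMatchA, inMatchSw, swapCells_length, swapCells_row0_length, hcell]
  exact if_decide_or _ _ _ _
    (run_iff_window (fun j => cellSw b r1 c1 r2 c2 r j)
      (cellSw b r1 c1 r2 c2 r c) ((b.getD 0 []).length) c hc rfl)
    (run_iff_window (fun i => cellSw b r1 c1 r2 c2 i c)
      (cellSw b r1 c1 r2 c2 r c) (b.length) r hr rfl)

theorem any_congr_mem {α : Type} (l : List α) (f g : α → Bool)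
    (h : ∀ x ∈ l, f x = g x) : l.any f = l.any g := by
  induction l with
  | nil => rfl
  | cons a t ih =>
    simp only [List.any_cons, h a (List.mem_cons_self), ih (fun x hx => h x (List.mem_cons_of_mem a hx))]

-- ===== VERDICT (by name: the statement is the Claim_ definition above) =====
theorem has_possible_move_spec : Claim_equal_has_possible_move := by
  intro board _ hP
  unfold Spec_has_possible_move
  unfold has_possible_move has_possible_move_alt
  apply any_congr_mem
  intro r hrmem
  have hr : r < board.length := List.mem_range.mp hrmem
  apply any_congr_mem
  intro c hcmem
  have hc : c < (board.getD 0 []).length := List.mem_range.mp hcmem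
  have hstep : ∀ (x y : Bool) (x' y' : Bool), x = x' → y = y' →
      ((x || y) = (x' || y')) := by intro x y x' y' hx hy; rw [hx, hy]
  apply hstep
  · by_cases hcb : c + 1 < (board.getD 0 []).length
    · simp only [hcb, decide_true, Bool.true_and]
      simp only [wouldMatchA]
      rw [cellInMatch_eq board r c r (c+1) hP hr hc hr hcb (by omega) r c hr hc,
          cellInMatch_eq board r c r (c+1) hP hr hc hr hcb (by omega) r (c+1) hr hcb]
    · have hcb' : ¬ c + 1 < (board[0]?.getD []).length := by
        simpa [List.getD_eq_getElem?_getD] using hcb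
      simp [hcb']
  · by_cases hrb : r + 1 < board.length
    · simp only [hrb, decide_true, Bool.true_and]
      simp only [wouldMatchA]
      rw [cellInMatch_eq board r c (r+1) c hP hr hc hrb hc (by omega) r c hr hc,
          cellInMatch_eq board r c (r+1) c hP hr hc hrb hc (by omega) (r+1) c hrb hc]
    · simp [hrb]
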